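-- pv_equiv track=rewrite | github.com/ho9science/subwaygraphinSeoul | sslg/metrograph.py | makeTransferStationSameFr
-- ===== SOURCE A (Python) =====
-- def makeTransferStationSameFr(transfer_list, od):
--     transfer_station = {}
--     for station in transfer_list:
--         line_list = []
--         for fr, v in od.items():
--             if station == v[0]:
--                 line_list.append(fr)
--         transfer_station[station]=line_list
--
--     return transfer_station
-- ===== SOURCE B (Python) =====
-- def makeTransferStationSameFr(transfer_list, od):
--     # One pass over od grouping line ids by their first station, then one lookup per station.
--     groups = {}
--     for fr, v in od.items():
--         if v:
--             groups.setdefault(v[0], []).append(fr)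
--     return {station: groups.get(station, []) for station in transfer_list}
-- ===== Notes on version B (the rewrite author's own statement) =====
-- stated objective: faster
-- what changed: Replaces the nested scan (for every transfer station a full pass over od) by a single grouping pass over od keyed by each route's first station, followed by one dictionary lookup per station.
import Mathlib
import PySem

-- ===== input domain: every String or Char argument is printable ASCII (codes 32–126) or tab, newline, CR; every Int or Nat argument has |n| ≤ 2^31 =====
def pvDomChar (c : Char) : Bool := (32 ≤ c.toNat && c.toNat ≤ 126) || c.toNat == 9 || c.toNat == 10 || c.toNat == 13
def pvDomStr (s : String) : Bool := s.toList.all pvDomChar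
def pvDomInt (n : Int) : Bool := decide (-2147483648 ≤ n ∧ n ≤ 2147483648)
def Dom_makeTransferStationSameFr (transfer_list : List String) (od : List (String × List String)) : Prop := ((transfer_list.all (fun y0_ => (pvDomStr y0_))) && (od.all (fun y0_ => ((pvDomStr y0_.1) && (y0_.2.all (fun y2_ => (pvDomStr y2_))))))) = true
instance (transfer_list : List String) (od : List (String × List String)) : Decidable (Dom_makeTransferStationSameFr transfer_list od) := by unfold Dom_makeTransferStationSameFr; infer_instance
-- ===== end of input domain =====

-- ===== PORT A =====
-- B replaces A's nested scan by one grouping pass over od plus a lookup per station (faster);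
-- Pre_ excludes exactly the inputs where A raises IndexError on v[0].
def makeTransferStationSameFr (transfer_list : List String) (od : List (String × List String)) : List (String × List String) :=
  (transfer_list.foldl (fun ts station =>
      let line_list := od.foldl (fun ll p =>
        if PySem.List.pyGet? p.2 0 = some station then ll ++ [p.1] else ll) []
      ts.insert station line_list)
    PySem.Dict.empty).items

-- ===== PORT B =====
def altGroups (od : List (String × List String)) : PySem.Dict String (List String) :=
  od.foldl (fun g p =>
    match PySem.List.pyGet? p.2 0 with
    | some h => g.modify h [] (· ++ [p.1])
    | none => g) PySem.Dict.empty

def makeTransferStationSameFr_alt (transfer_list : List String) (od : List (String × List String)) : List (String × List String) :=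
  let groups := altGroups od
  (transfer_list.foldl (fun ts station => ts.insert station (groups.getD station [])) PySem.Dict.empty).items

-- ===== PRECONDITION & SPEC =====
-- Pre_ holds exactly when Python A returns normally (it raises IndexError iff transfer_list is
-- nonempty and some od value is the empty list).
def Pre_makeTransferStationSameFr (transfer_list : List String) (od : List (String × List String)) : Prop :=
  transfer_list = [] ∨ ∀ p ∈ od, p.2 ≠ []
instance (transfer_list : List String) (od : List (String × List String)) : Decidable (Pre_makeTransferStationSameFr transfer_list od) := by unfold Pre_makeTransferStationSameFr; infer_instance
def pvWitness_makeTransferStationSameFr : List String × (List (String × List String)) := (["A"], [("2", ["A", "B"]), ("4", ["C"])])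

def Spec_makeTransferStationSameFr (transfer_list : List String) (od : List (String × List String)) (out : List (String × List String)) : Prop := out = makeTransferStationSameFr_alt transfer_list od
instance (transfer_list : List String) (od : List (String × List String)) (out : List (String × List String)) : Decidable (Spec_makeTransferStationSameFr transfer_list od out) := by unfold Spec_makeTransferStationSameFr; infer_instance

-- ===== CLAIM =====
def Claim_equal_makeTransferStationSameFr : Prop := ∀ (transfer_list : List String) (od : List (String × List String)), Dom_makeTransferStationSameFr transfer_list od → Pre_makeTransferStationSameFr transfer_list od → Spec_makeTransferStationSameFr transfer_list od (makeTransferStationSameFr transfer_list od)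
-- ===== LEMMAS AND PROOFS =====
-- B's grouping fold, read back at one station, is exactly A's inner scan.
theorem altGroups_getD (od : List (String × List String)) (g : PySem.Dict String (List String)) (station : String) :
    (od.foldl (fun g p =>
      match PySem.List.pyGet? p.2 0 with
      | some h => g.modify h [] (· ++ [p.1])
      | none => g) g).getD station []
    = od.foldl (fun ll p =>
        if PySem.List.pyGet? p.2 0 = some station then ll ++ [p.1] else ll) (g.getD station []) := by
  induction od generalizing g with
  | nil => rfl
  | cons p od ih =>
    simp only [List.foldl]
    cases hp : PySem.List.pyGet? p.2 0 with
    | none => simp [ih]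
    | some h =>
      rw [ih]
      change List.foldl _ ((g.modify h [] (· ++ [p.1])).getD station []) od = _
      rw [PySem.Dict.getD_modify]
      by_cases hs : station = h
      · subst hs; simp
      · have hs' : ¬ (h = station) := fun he => hs he.symm
        simp [hs, hs']

-- the two outer folds agree from any accumulator
theorem outer_fold_eq (od : List (String × List String)) (tl : List String) :
    ∀ ts : PySem.Dict String (List String),
      tl.foldl (fun ts station =>
        ts.insert station (od.foldl (fun ll p =>
          if PySem.List.pyGet? p.2 0 = some station then ll ++ [p.1] else ll) [])) ts
      = tl.foldl (fun ts station => ts.insert station ((altGroups od).getD station [])) ts := by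
  induction tl with
  | nil => intro _; rfl
  | cons s tl ih =>
    intro ts
    simp only [List.foldl]
    rw [show (altGroups od).getD s [] = od.foldl (fun ll p =>
        if PySem.List.pyGet? p.2 0 = some s then ll ++ [p.1] else ll) [] from altGroups_getD od PySem.Dict.empty s]
    exact ih _

theorem makeTransferStationSameFr_eq (transfer_list : List String) (od : List (String × List String)) :
    makeTransferStationSameFr transfer_list od = makeTransferStationSameFr_alt transfer_list od := by
  unfold makeTransferStationSameFr makeTransferStationSameFr_alt
  rw [outer_fold_eq od transfer_list PySem.Dict.empty]

-- ===== VERDICT =====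
theorem makeTransferStationSameFr_spec : Claim_equal_makeTransferStationSameFr := by
  intro tl od _ _
  exact makeTransferStationSameFr_eq tl od
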